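-- pv_equiv track=rewrite | github.com/divyajeettt/CSE101 | Assignments/Assignment-2/A2_2021529_6.py | diagonal_rl
-- ===== SOURCE A (Python) =====
-- def diagonal_rl(matrix: list[list[int]]) -> list[int]:
--     """returns the list of elements obtained (in order) in right to left diagonal traversal"""
--
--     n, copy = len(matrix), matrix.copy()
--     for i in range(n):
--         copy[i] = [None]*i + copy[i] + [None]*(n-i)
--
--     answer = []
--     for i in range(2*n):
--         for j in range(n):
--             if copy[j][i] is None:
--                 continue
--             answer.append(copy[j][i])
--
--     return answer
-- ===== SOURCE B (Python) =====
-- def diagonal_rl(matrix: list[list[int]]) -> list[int]: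
--     """returns the list of elements obtained (in order) in right to left diagonal traversal"""
--     n = len(matrix)
--     buckets = [[] for _ in range(2 * n)]
--     for j in range(n):
--         row = matrix[j]
--         for k in range(len(row)):
--             d = j + k
--             if d < 2 * n:
--                 buckets[d].append(row[k])
--     answer = []
--     for b in buckets:
--         answer += b
--     return answer
-- ===== Notes on version B (the rewrite author's own statement) =====
-- stated objective: simpler
-- what changed: Replaces A's None-padding of every row and 2n-column scan over all rows (with None skipping) by a single pass over the matrix that appends each element matrix[j][k] to a per-diagonal bucket j+k, then concatenates the buckets.
-- crash fix: On matrices where some row is shorter than len(matrix), A raises IndexError while B returns the diagonal traversal of the elements that are present. — e.g. on diagonal_rl([[1], [2, 3]]): A raises IndexError, B returns [1, 2, 3]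
import Mathlib
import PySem

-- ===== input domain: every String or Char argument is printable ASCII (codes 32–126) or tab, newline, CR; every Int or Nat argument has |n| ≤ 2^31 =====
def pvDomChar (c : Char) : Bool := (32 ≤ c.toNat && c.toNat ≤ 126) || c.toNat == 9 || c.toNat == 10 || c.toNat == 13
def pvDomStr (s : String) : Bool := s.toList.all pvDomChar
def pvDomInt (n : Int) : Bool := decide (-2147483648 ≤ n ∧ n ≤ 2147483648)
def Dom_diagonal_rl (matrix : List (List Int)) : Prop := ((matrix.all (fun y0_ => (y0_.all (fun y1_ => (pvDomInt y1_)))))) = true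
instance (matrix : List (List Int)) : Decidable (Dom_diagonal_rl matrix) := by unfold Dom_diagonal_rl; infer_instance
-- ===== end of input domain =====

-- B replaces A's None-padding and 2n-column scan over all rows by a single pass over the
-- matrix that fills per-diagonal buckets (objective: simpler decomposition, same values).

-- ===== PORT A =====
-- A pads row i with i Nones in front and n-i behind (modelled as Option Int), then scans
-- columns 0..2n-1 over all rows, skipping None. Python raises IndexError when some row is
-- shorter than n (those inputs are excluded by Pre_); the port reads out-of-range as None.
def diagonal_rl (matrix : List (List Int)) : List Int :=
  let n := matrix.length
  let copy := matrix.mapIdx (fun i row =>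
    List.replicate i (none : Option Int) ++ row.map some ++ List.replicate (n - i) none)
  (List.range (2 * n)).foldl (fun answer i =>
    (List.range n).foldl (fun answer j =>
      match (copy.getD j []).getD i none with
      | none => answer
      | some x => answer ++ [x]) answer) []

-- ===== PORT B =====
def diagonal_rl_alt (matrix : List (List Int)) : List Int :=
  let n := matrix.length
  let buckets := (List.range n).foldl (fun bs j =>
      let row := matrix.getD j []
      (List.range row.length).foldl (fun bs k =>
        let d := j + k
        if d < 2 * n then bs.set d (bs.getD d [] ++ [row.getD k 0]) else bs) bs)
    (List.replicate (2 * n) [])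
  buckets.foldl (fun ans b => ans ++ b) []

-- ===== PRECONDITION & SPEC =====
-- Pre_ excludes matrices having a row shorter than len(matrix): A raises IndexError there.
def Pre_diagonal_rl (matrix : List (List Int)) : Prop :=
  ∀ row ∈ matrix, matrix.length ≤ row.length
instance (matrix : List (List Int)) : Decidable (Pre_diagonal_rl matrix) := by
  unfold Pre_diagonal_rl; infer_instance
def pvWitness_diagonal_rl : List (List Int) := [[1, 2], [3, 4]]

-- On matrices with some row shorter than len(matrix), A raises IndexError while B returns
-- the diagonal traversal of the elements that are present.
def Raises_diagonal_rl (matrix : List (List Int)) : Prop :=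
  ∃ row ∈ matrix, row.length < matrix.length
instance (matrix : List (List Int)) : Decidable (Raises_diagonal_rl matrix) := by
  unfold Raises_diagonal_rl; infer_instance
def pvRaiseWitness_diagonal_rl : List (List Int) := [[1], [2, 3]]
def pvRaiseWitnessOut_diagonal_rl : List Int := [1, 2, 3]

def Spec_diagonal_rl (matrix : List (List Int)) (out : List Int) : Prop := out = diagonal_rl_alt matrix
instance (matrix : List (List Int)) (out : List Int) : Decidable (Spec_diagonal_rl matrix out) := by unfold Spec_diagonal_rl; infer_instance

-- ===== CLAIM (what is proved, stated in full; the proofs are below) =====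
def Claim_equal_diagonal_rl : Prop := ∀ (matrix : List (List Int)), Dom_diagonal_rl matrix → Pre_diagonal_rl matrix → Spec_diagonal_rl matrix (diagonal_rl matrix)
def Claim_raises_diagonal_rl : Prop := (∀ (matrix : List (List Int)), Dom_diagonal_rl matrix → Raises_diagonal_rl matrix → ¬ Pre_diagonal_rl matrix) ∧ (Dom_diagonal_rl (pvRaiseWitness_diagonal_rl) ∧ Raises_diagonal_rl (pvRaiseWitness_diagonal_rl) ∧ diagonal_rl_alt (pvRaiseWitness_diagonal_rl) = pvRaiseWitnessOut_diagonal_rl)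

-- ===== LEMMAS AND PROOFS =====

-- the element of diagonal i contributed by row j (none if absent)
def pvEntry (matrix : List (List Int)) (j i : Nat) : Option Int :=
  if j ≤ i ∧ i - j < (matrix.getD j []).length
  then some ((matrix.getD j []).getD (i - j) 0) else none

-- the diagonal-i list, rows in increasing order
def pvDiag (matrix : List (List Int)) (i : Nat) : List Int :=
  (List.range matrix.length).filterMap (fun j => pvEntry matrix j i)

lemma pv_foldl_match {α : Type} (l : List α) (f : α → Option Int) (a : List Int) :
    l.foldl (fun ans j => match f j with | none => ans | some x => ans ++ [x]) a
      = a ++ l.filterMap f := by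
  induction l generalizing a with
  | nil => simp
  | cons hd tl ih =>
    cases h : f hd <;> simp [List.foldl_cons, h, ih]

lemma pv_foldl_app {α : Type} (l : List α) (g : α → List Int) (a : List Int) :
    l.foldl (fun ans i => ans ++ g i) a = a ++ l.flatMap g := by
  induction l generalizing a with
  | nil => simp
  | cons hd tl ih => simp [List.foldl_cons, ih]

lemma pv_pad_getD (row : List Int) (j n i : Nat) :
    (List.replicate j (none : Option Int) ++ row.map some ++ List.replicate (n - j) none).getD i none
      = (if j ≤ i ∧ i - j < row.length then some (row.getD (i - j) 0) else none) := by
  rcases Nat.lt_or_ge i j with hij | hij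
  · rw [List.getD_append _ _ _ _ (by simpa using lt_of_lt_of_le hij (by simp))]
    have hc : ¬(j ≤ i ∧ i - j < row.length) := by omega
    rw [if_neg hc]
    rw [List.getD, List.getElem?_append_left (by simpa using hij)]
    simp [hij]
  · rw [List.append_assoc, List.getD_append_right _ _ _ _ (by simpa using hij)]
    simp only [List.length_replicate]
    rcases Nat.lt_or_ge (i - j) row.length with h2 | h2
    · rw [List.getD_append _ _ _ _ (by simpa using h2)]
      rw [if_pos ⟨hij, h2⟩]
      simp [List.getD, List.getElem?_eq_getElem (by simpa using h2 : i - j < (row.map some).length),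
            List.getElem?_eq_getElem h2]
    · have hc : ¬(j ≤ i ∧ i - j < row.length) := by omega
      rw [if_neg hc, List.getD, List.getElem?_append_right (by simpa using h2)]
      simp [List.getElem?_replicate]
      split <;> rfl

lemma pv_A_closed (matrix : List (List Int)) :
    diagonal_rl matrix
      = (List.range (2 * matrix.length)).flatMap (pvDiag matrix) := by
  unfold diagonal_rl
  simp only []
  have h1 : ∀ (i : Nat) (a : List Int),
      (List.range matrix.length).foldl (fun answer j =>
        match ((matrix.mapIdx (fun i row =>
          List.replicate i (none : Option Int) ++ row.map some ++ List.replicate (matrix.length - i) none)).getD j []).getD i none with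
        | none => answer
        | some x => answer ++ [x]) a = a ++ pvDiag matrix i := by
    intro i a
    rw [pv_foldl_match]
    unfold pvDiag
    congr 1
    apply List.filterMap_congr
    intro j hj
    have hj' : j < matrix.length := by simpa using hj
    have : (matrix.mapIdx (fun i row =>
        List.replicate i (none : Option Int) ++ row.map some ++ List.replicate (matrix.length - i) none)).getD j []
        = List.replicate j (none : Option Int) ++ (matrix.getD j []).map some ++ List.replicate (matrix.length - j) none := by
      rw [List.getD_eq_getElem _ _ (by simpa using hj'), List.getElem_mapIdx,
          List.getD_eq_getElem _ _ hj']
    rw [this, pv_pad_getD, pvEntry]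
  have h2 : (fun (answer : List Int) (i : Nat) =>
      (List.range matrix.length).foldl (fun answer j =>
        match ((matrix.mapIdx (fun i row =>
          List.replicate i (none : Option Int) ++ row.map some ++ List.replicate (matrix.length - i) none)).getD j []).getD i none with
        | none => answer
        | some x => answer ++ [x]) answer)
      = fun (answer : List Int) (i : Nat) => answer ++ pvDiag matrix i :=
    funext fun a => funext fun i => h1 i a
  rw [h2, pv_foldl_app]
  simp

lemma pv_getD_set (bs : List (List Int)) (d : Nat) (v : List Int) (i : Nat) :
    (bs.set d v).getD i [] = if i = d ∧ d < bs.length then v else bs.getD i [] := by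
  simp only [List.getD, List.getElem?_set]
  split_ifs with h h1 h2 h3 <;> simp_all

lemma pv_inner_len (m : Nat) (f : Nat → Int) (j N : Nat) (bs : List (List Int)) :
    ((List.range m).foldl (fun bs k =>
        if j + k < N then bs.set (j + k) (bs.getD (j + k) [] ++ [f k]) else bs) bs).length
      = bs.length := by
  induction m generalizing bs with
  | zero => simp
  | succ m ih =>
    rw [List.range_succ, List.foldl_append, List.foldl_cons, List.foldl_nil]
    split
    · rw [List.length_set, ih]
    · rw [ih]

lemma pv_inner_getD (m : Nat) (f : Nat → Int) (j N : Nat) (bs : List (List Int))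
    (h : bs.length = N) (i : Nat) :
    ((List.range m).foldl (fun bs k =>
        if j + k < N then bs.set (j + k) (bs.getD (j + k) [] ++ [f k]) else bs) bs).getD i []
      = bs.getD i [] ++ (if j ≤ i ∧ i - j < m ∧ i < N then [f (i - j)] else []) := by
  induction m generalizing bs with
  | zero => simp
  | succ m ih =>
    rw [List.range_succ, List.foldl_append, List.foldl_cons, List.foldl_nil]
    have hlen : ((List.range m).foldl (fun bs k =>
        if j + k < N then bs.set (j + k) (bs.getD (j + k) [] ++ [f k]) else bs) bs).length = N := by
      rw [pv_inner_len, h]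
    split
    · rw [pv_getD_set, hlen]
      by_cases hi : i = j + m
      · subst hi
        rw [if_pos ⟨rfl, by omega⟩, ih bs h]
        rw [if_neg (by omega : ¬(j ≤ j + m ∧ j + m - j < m ∧ j + m < N)),
            if_pos (by omega : j ≤ j + m ∧ j + m - j < m + 1 ∧ j + m < N)]
        rw [(by omega : j + m - j = m)]
        simp
      · rw [if_neg (by intro hc; exact hi hc.1), ih bs h]
        congr 1
        by_cases c : j ≤ i ∧ i - j < m ∧ i < N
        · rw [if_pos c, if_pos (by omega)]
        · rw [if_neg c, if_neg (by omega)]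
    · rw [ih bs h]
      congr 1
      rename_i hge
      by_cases c : j ≤ i ∧ i - j < m ∧ i < N
      · rw [if_pos c, if_pos (by omega)]
      · rw [if_neg c, if_neg (by omega)]

lemma pv_outer_len (matrix : List (List Int)) (m N : Nat) (bs : List (List Int)) :
    ((List.range m).foldl (fun bs j =>
        (List.range (matrix.getD j []).length).foldl (fun bs k =>
          if j + k < N then bs.set (j + k) (bs.getD (j + k) [] ++ [(matrix.getD j []).getD k 0]) else bs) bs) bs).length
      = bs.length := by
  induction m generalizing bs with
  | zero => simp
  | succ m ih =>
    rw [List.range_succ, List.foldl_append, List.foldl_cons, List.foldl_nil]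
    rw [pv_inner_len, ih]

lemma pv_outer_getD (matrix : List (List Int)) (m N : Nat) (bs : List (List Int))
    (h : bs.length = N) (i : Nat) :
    ((List.range m).foldl (fun bs j =>
        (List.range (matrix.getD j []).length).foldl (fun bs k =>
          if j + k < N then bs.set (j + k) (bs.getD (j + k) [] ++ [(matrix.getD j []).getD k 0]) else bs) bs) bs).getD i []
      = bs.getD i [] ++ (List.range m).filterMap (fun j =>
          if j ≤ i ∧ i - j < (matrix.getD j []).length ∧ i < N
          then some ((matrix.getD j []).getD (i - j) 0) else none) := by
  induction m generalizing bs with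
  | zero => simp
  | succ m ih =>
    rw [List.range_succ, List.foldl_append, List.foldl_cons, List.foldl_nil]
    rw [pv_inner_getD _ _ _ _ _ (by rw [pv_outer_len, h]) i, ih bs h]
    rw [List.filterMap_append, List.append_assoc]
    congr 1
    simp only [List.filterMap_cons, List.filterMap_nil]
    split
    · simp
    · simp

lemma pv_B_closed (matrix : List (List Int)) :
    diagonal_rl_alt matrix
      = (List.range (2 * matrix.length)).flatMap (pvDiag matrix) := by
  unfold diagonal_rl_alt
  simp only []
  have hbuckets : ((List.range matrix.length).foldl (fun bs j =>
      (List.range (matrix.getD j []).length).foldl (fun bs k =>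
        if j + k < 2 * matrix.length then bs.set (j + k) (bs.getD (j + k) [] ++ [(matrix.getD j []).getD k 0]) else bs) bs)
      (List.replicate (2 * matrix.length) []))
      = (List.range (2 * matrix.length)).map (pvDiag matrix) := by
    apply List.ext_getElem
    · rw [pv_outer_len]; simp
    · intro i hi1 hi2
      have hlen : (List.replicate (2 * matrix.length) ([] : List Int)).length = 2 * matrix.length := by simp
      have hi : i < 2 * matrix.length := by
        rw [pv_outer_len] at hi1; simpa using hi1
      rw [← List.getD_eq_getElem _ [] hi1, pv_outer_getD _ _ _ _ hlen]
      rw [List.getElem_map, List.getElem_range]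
      rw [List.getD_replicate, List.nil_append]
      unfold pvDiag
      apply List.filterMap_congr
      intro j _
      unfold pvEntry
      by_cases c : j ≤ i ∧ i - j < (matrix.getD j []).length
      · rw [if_pos ⟨c.1, c.2, hi⟩, if_pos c]
      · rw [if_neg (by tauto), if_neg c]
      exact hi
  rw [hbuckets, pv_foldl_app]
  simp [List.flatMap_def]
  rfl

-- ===== VERDICT (by name: the statement is the Claim_ definition above) =====
theorem diagonal_rl_spec : Claim_equal_diagonal_rl := by
  intro matrix _ _
  unfold Spec_diagonal_rl
  rw [pv_A_closed, pv_B_closed]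

@[simp]
theorem diagonal_rl_raises : Claim_raises_diagonal_rl := by
  unfold Claim_raises_diagonal_rl
  constructor
  · intro matrix _ hr hp
    obtain ⟨row, hmem, hlt⟩ := hr
    exact absurd (hp row hmem) (by omega)
  · exact ⟨by decide, ⟨[1], by simp [pvRaiseWitness_diagonal_rl], by decide⟩, by decide⟩
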